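-- pv_equiv track=rewrite | github.com/nguyenchiemminhvu/DSA | Problems/Leetcode/CategorizeBoxAccordingToCriteria/solve.py | categorizeBox
-- ===== SOURCE A (Python) =====
-- def categorizeBox(l: int, w: int, h: int, m: int) -> str:
--     bulky = False
--     heavy = False
--     if any(val >= 10**4 for val in [l, w, h]) or l * w * h >= 10**9:
--         bulky = True
--     if m >= 100:
--         heavy = True
--
--     if bulky and heavy:
--         return "Both"
--     if not bulky and not heavy:
--         return "Neither"
--     if bulky:
--         return "Bulky"
--     return "Heavy"
-- ===== SOURCE B (Python) =====
-- def categorizeBox(l: int, w: int, h: int, m: int) -> str: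
--     # bulky via one recursive short-circuit scan over the dimensions that
--     # accumulates the running volume; label built by nested conditionals.
--     def scan(dims, vol):
--         if not dims:
--             return vol >= 10**9
--         return dims[0] >= 10**4 or scan(dims[1:], vol * dims[0])
--     bulky = scan([l, w, h], 1)
--     return ("Both" if m >= 100 else "Bulky") if bulky else ("Heavy" if m >= 100 else "Neither")
-- ===== Notes on version B (the rewrite author's own statement) =====
-- stated objective: alternative
-- what changed: Replaces the staged any()-check plus separate product and the four sequential flag-comparison branches with a single recursive short-circuit scan that accumulates the volume while checking each dimension, and a nested conditional expression that selects the label.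
import Mathlib
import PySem

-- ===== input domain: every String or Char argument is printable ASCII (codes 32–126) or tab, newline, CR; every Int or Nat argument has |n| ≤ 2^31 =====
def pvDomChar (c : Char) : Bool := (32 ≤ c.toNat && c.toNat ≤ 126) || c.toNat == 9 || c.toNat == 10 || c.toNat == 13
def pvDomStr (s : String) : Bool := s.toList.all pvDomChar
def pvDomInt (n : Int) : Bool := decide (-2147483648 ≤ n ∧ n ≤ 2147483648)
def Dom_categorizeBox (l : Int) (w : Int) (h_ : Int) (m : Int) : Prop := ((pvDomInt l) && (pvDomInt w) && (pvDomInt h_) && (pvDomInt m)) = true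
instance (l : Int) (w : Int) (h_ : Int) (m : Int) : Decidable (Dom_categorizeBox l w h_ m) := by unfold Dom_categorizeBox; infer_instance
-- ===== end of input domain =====

-- B computes bulky by one recursive short-circuit scan accumulating the volume and picks the label with nested conditionals (objective: alternative).


-- ===== PORT A =====
-- Port of A: flag variables set by sequential ifs, then a four-branch return chain.
def categorizeBox (l : Int) (w : Int) (h_ : Int) (m : Int) : String :=
  let bulky := false
  let heavy := false
  let bulky := if ([l, w, h_].any (fun val => decide (val ≥ 10 ^ 4))) || decide (l * w * h_ ≥ 10 ^ 9) then true else bulky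
  let heavy := if m ≥ 100 then true else heavy
  if bulky && heavy then "Both"
  else if !bulky && !heavy then "Neither"
  else if bulky then "Bulky"
  else "Heavy"

-- ===== PORT B =====
-- Port of B: recursive short-circuit scan with a volume accumulator, then nested conditional label selection.
def categorizeBoxScan : List Int → Int → Bool
  | [], vol => decide (vol ≥ 10 ^ 9)
  | d :: ds, vol => decide (d ≥ 10 ^ 4) || categorizeBoxScan ds (vol * d)

def categorizeBox_alt (l : Int) (w : Int) (h_ : Int) (m : Int) : String :=
  let bulky := categorizeBoxScan [l, w, h_] 1
  if bulky then (if m ≥ 100 then "Both" else "Bulky")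
  else (if m ≥ 100 then "Heavy" else "Neither")

-- ===== PRECONDITION & SPEC =====
def Spec_categorizeBox (l : Int) (w : Int) (h_ : Int) (m : Int) (out : String) : Prop := out = categorizeBox_alt l w h_ m
instance (l : Int) (w : Int) (h_ : Int) (m : Int) (out : String) : Decidable (Spec_categorizeBox l w h_ m out) := by unfold Spec_categorizeBox; infer_instance

-- ===== CLAIM (what is proved, stated in full; the proofs are below) =====
def Claim_equal_categorizeBox : Prop := ∀ (l : Int) (w : Int) (h_ : Int) (m : Int), Dom_categorizeBox l w h_ m → Spec_categorizeBox l w h_ m (categorizeBox l w h_ m)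

-- ===== LEMMAS AND PROOFS =====
-- The short-circuit scan on the three dimensions equals the flat disjunction A tests.
theorem categorizeBoxScan_three (l w h_ : Int) :
    categorizeBoxScan [l, w, h_] 1 =
      (decide (l ≥ 10 ^ 4) || decide (w ≥ 10 ^ 4) || decide (h_ ≥ 10 ^ 4)
        || decide (l * w * h_ ≥ 10 ^ 9)) := by
  simp [categorizeBoxScan, one_mul, mul_assoc, Bool.or_assoc]

-- ===== VERDICT (by name: the statement is the Claim_ definition above) =====
theorem categorizeBox_spec : Claim_equal_categorizeBox := by
  intro l w h_ m _
  unfold Spec_categorizeBox categorizeBox categorizeBox_alt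
  rw [categorizeBoxScan_three]
  rcases hl : decide (l ≥ 10 ^ 4) <;> rcases hw : decide (w ≥ 10 ^ 4) <;>
    rcases hh : decide (h_ ≥ 10 ^ 4) <;> rcases hv : decide (l * w * h_ ≥ 10 ^ 9) <;>
    rcases hm : decide (m ≥ 100) <;>
    simp_all <;>
    (split_ifs <;> first | rfl | omega)
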